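-- pv_equiv track=rewrite | github.com/codemaster004/pythonAI | DecisionTree.py | __combinator_values__
-- ===== SOURCE A (Python) =====
-- import itertools
--
-- def __combinator_values__(values):
--     combined = []
--     for i in range(len(values) - 1):
--         separator = '||'
--         values_com = list(itertools.combinations(values, i + 1))
--         for v_set in values_com:
--             combined.append(separator.join(v_set))
--     return combined
-- ===== SOURCE B (Python) =====
-- def __combinator_values__(values):
--     # DP table built in one right-to-left pass: layers[r] holds the size-r
--     # combinations (as lists) of the current suffix, in itertools order.
--     layers = [[[]]]
--     for x in reversed(values):
--         layers = [[[]]] + [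
--             [[x] + c for c in layers[r - 1]] +
--             (layers[r] if r < len(layers) else [])
--             for r in range(1, len(layers) + 1)]
--     out = []
--     for r in range(1, len(values)):
--         for c in layers[r]:
--             out.append('||'.join(c))
--     return out
-- ===== Notes on version B (the rewrite author's own statement) =====
-- stated objective: alternative
-- what changed: Replaces the per-size itertools.combinations calls with a dynamic-programming table built in one right-to-left pass (layers[r] = size-r combinations of the suffix), then joins layers 1..n-1.
import Mathlib
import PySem

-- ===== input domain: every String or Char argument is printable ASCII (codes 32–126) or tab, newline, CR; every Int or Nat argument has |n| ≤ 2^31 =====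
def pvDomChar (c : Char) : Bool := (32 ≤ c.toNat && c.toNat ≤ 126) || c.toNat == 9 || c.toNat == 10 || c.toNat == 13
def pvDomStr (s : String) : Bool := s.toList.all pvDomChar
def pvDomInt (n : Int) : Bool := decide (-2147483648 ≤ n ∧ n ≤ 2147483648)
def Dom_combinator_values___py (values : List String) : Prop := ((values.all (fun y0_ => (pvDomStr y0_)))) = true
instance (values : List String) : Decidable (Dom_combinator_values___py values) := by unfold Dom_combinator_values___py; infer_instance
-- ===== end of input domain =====

-- B replaces A's per-size itertools.combinations calls with a one-pass DP table of
-- combinations by size (alternative decomposition, same output-sized cost).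


-- ===== PORT A =====
-- itertools.combinations(values, r) in itertools' lexicographic-by-position order
def pvCombos : List String → Nat → List (List String)
  | _, 0 => [[]]
  | [], _ + 1 => []
  | x :: xs, r + 1 => (pvCombos xs r).map (fun c => x :: c) ++ pvCombos xs (r + 1)

def combinator_values___py (values : List String) : List String :=
  (PySem.List.pyRange 0 ((values.length : Int) - 1) 1).foldl
    (fun combined i =>
      combined ++ (pvCombos values (i + 1).toNat).map (fun v_set => PySem.Str.join "||" v_set))
    []

-- ===== PORT B =====
-- one step of the right-to-left DP pass: layers[r] = size-r combinations of the suffix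
def pvStep (x : String) (layers : List (List (List String))) : List (List (List String)) :=
  [[]] :: (PySem.List.pyRange 1 ((layers.length : Int) + 1) 1).map (fun r =>
      (PySem.List.pyGetD layers (r - 1) []).map (fun c => x :: c) ++
      (if r < (layers.length : Int) then PySem.List.pyGetD layers r [] else []))

-- 'for x in reversed(values): layers = …' is the right fold of pvStep
def pvLayers (values : List String) : List (List (List String)) :=
  values.foldr pvStep [[[]]]

def combinator_values___py_alt (values : List String) : List String :=
  (PySem.List.pyRange 1 (values.length : Int) 1).foldl
    (fun out r =>
      out ++ (PySem.List.pyGetD (pvLayers values) r []).map (fun c => PySem.Str.join "||" c))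
    []

-- ===== PRECONDITION & SPEC =====
def Spec_combinator_values___py (values : List String) (out : List String) : Prop := out = combinator_values___py_alt values
instance (values : List String) (out : List String) : Decidable (Spec_combinator_values___py values out) := by unfold Spec_combinator_values___py; infer_instance

-- ===== CLAIM =====
def Claim_equal_combinator_values___py : Prop := ∀ (values : List String), Dom_combinator_values___py values → Spec_combinator_values___py values (combinator_values___py values)

-- ===== LEMMAS AND PROOFS =====
theorem pvCombos_nil_of_lt (xs : List String) :
    ∀ (r : Nat), xs.length < r → pvCombos xs r = [] := by
  induction xs with
  | nil =>
    intro r h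
    cases r with
    | zero => omega
    | succ r => simp [pvCombos]
  | cons x xs ih =>
    intro r h
    cases r with
    | zero => omega
    | succ r =>
      simp only [pvCombos]
      rw [ih r (by simp at h; omega), ih (r + 1) (by simp at h; omega)]
      simp

theorem pvLayers_length (values : List String) :
    (pvLayers values).length = values.length + 1 := by
  induction values with
  | nil => simp [pvLayers]
  | cons x xs ih =>
    simp only [pvLayers, List.foldr] at *
    simp [pvStep, PySem.List.length_pyRange_one, ih]

theorem pvLayers_getD (values : List String) :
    ∀ (r : Nat), (pvLayers values).getD r [] = pvCombos values r := by
  induction values with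
  | nil =>
    intro r
    cases r with
    | zero => simp [pvLayers, pvCombos]
    | succ r => simp [pvLayers, pvCombos, List.getD]
  | cons x xs ih =>
    intro r
    have hlen : (pvLayers xs).length = xs.length + 1 := pvLayers_length xs
    show (pvStep x (pvLayers xs)).getD r [] = pvCombos (x :: xs) r
    cases r with
    | zero => simp [pvStep, pvCombos]
    | succ j =>
      simp only [pvStep, PySem.List.pyRange_one, List.getD_cons_succ, List.map_map]
      by_cases hj : j < (pvLayers xs).length
      · rw [List.getD, List.getElem?_map, List.getElem?_range (by simpa using hj)]
        simp only [Option.map_some, Option.getD_some, Function.comp]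
        have h1 : ((1 : Int) + (j : Int) - 1) = (j : Int) := by ring
        have h2 : ((1 : Int) + (j : Int)) = ((j + 1 : Nat) : Int) := by push_cast; ring
        rw [h1, h2, PySem.List.pyGetD_natCast, PySem.List.pyGetD_natCast, ih j]
        have hsame : (pvLayers xs).getD (j + 1) [] = pvCombos xs (j + 1) := ih (j + 1)
        simp only [pvCombos]
        by_cases hlt : ((j + 1 : Nat) : Int) < ((pvLayers xs).length : Int)
        · rw [if_pos hlt, hsame]
        · rw [if_neg hlt]
          have : pvCombos xs (j + 1) = [] := by
            apply pvCombos_nil_of_lt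
            omega
          rw [this]
      · rw [List.getD_eq_default _ _ (by simp; omega)]
        have : pvCombos (x :: xs) (j + 1) = [] := by
          apply pvCombos_nil_of_lt
          simp only [List.length_cons]
          omega
        rw [this]

-- ===== VERDICT =====
theorem combinator_values___py_spec : Claim_equal_combinator_values___py := by
  intro values _
  unfold Spec_combinator_values___py combinator_values___py combinator_values___py_alt
  rw [PySem.List.foldl_append_eq_flatMap, PySem.List.foldl_append_eq_flatMap]
  simp only [List.nil_append, PySem.List.pyRange_one]
  have hn : ((values.length : Int) - 1 - 0).toNat = ((values.length : Int) - 1).toNat := by omega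
  rw [hn]
  have hm : ((values.length : Int) - 1).toNat = ((values.length : Int) - 1).toNat := rfl
  rw [List.flatMap_map, List.flatMap_map]
  congr 1
  funext k
  have h1 : ((0 : Int) + (k : Int) + 1) = ((k + 1 : Nat) : Int) := by push_cast; ring
  have h2 : ((1 : Int) + (k : Int)) = ((k + 1 : Nat) : Int) := by push_cast; ring
  simp only [h1, h2, Int.toNat_natCast, PySem.List.pyGetD_natCast,
    pvLayers_getD]
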